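-- pv_equiv track=rewrite | github.com/RobertoBetancourt/alpha-beta | alpha_beta.py | check_free_columns_to_win
-- ===== SOURCE A (Python) =====
-- def check_free_columns_to_win(board, rival_number):
--   valid_movements = 0
--   currently_valid = True
--   for i in range(5):
--     for j in range(5):
--       if board[j][i] == rival_number:
--         currently_valid = False
--         break
--
--     if currently_valid:
--       valid_movements += 1
--
--     currently_valid = True
--
--   return valid_movements
-- ===== SOURCE B (Python) =====
-- def check_free_columns_to_win(board, rival_number):
--   blocked = set()
--   for j in range(5):
--     for i in range(5):
--       if board[j][i] == rival_number:
--         blocked.add(i)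
--   return 5 - len(blocked)
-- ===== Notes on version B (the rewrite author's own statement) =====
-- stated objective: alternative
-- what changed: Replaces A's column-major scan with a per-column validity flag and early break by one uninterrupted row-major pass that accumulates the blocked column indices in a set and returns 5 - len(blocked).
-- outside the precondition, e.g. on check_free_columns_to_win([[7, 7, 7, 7, 7], []], 7): A returns 0, B raises IndexError
import Mathlib
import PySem

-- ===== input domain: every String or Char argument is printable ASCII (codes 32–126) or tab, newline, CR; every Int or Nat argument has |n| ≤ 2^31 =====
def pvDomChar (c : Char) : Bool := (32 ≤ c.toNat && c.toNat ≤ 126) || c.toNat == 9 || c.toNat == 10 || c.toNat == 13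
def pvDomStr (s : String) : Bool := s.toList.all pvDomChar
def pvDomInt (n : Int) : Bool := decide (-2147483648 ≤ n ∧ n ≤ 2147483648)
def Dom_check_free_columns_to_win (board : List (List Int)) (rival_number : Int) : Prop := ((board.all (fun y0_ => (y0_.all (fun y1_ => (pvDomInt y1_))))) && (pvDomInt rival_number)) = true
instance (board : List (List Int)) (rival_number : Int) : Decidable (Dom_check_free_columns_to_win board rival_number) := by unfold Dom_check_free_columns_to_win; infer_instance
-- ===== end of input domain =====

-- B counts the 5 columns not containing the rival's piece in one row-major pass that collects
-- the blocked column indices in a set, instead of A's column-major scan with an early break.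

-- ===== PORT A =====
-- inner 'for j in range(5): … break' of A: returns the value of currently_valid for column i
def pvAInner (board : List (List Int)) (rival_number i : Int) : List Int → Bool
  | [] => true
  | j :: rest =>
      if PySem.List.pyGetD (PySem.List.pyGetD board j []) i 0 == rival_number then false
      else pvAInner board rival_number i rest

def check_free_columns_to_win (board : List (List Int)) (rival_number : Int) : Int :=
  (PySem.List.pyRange 0 5 1).foldl
    (fun valid_movements i =>
      if pvAInner board rival_number i (PySem.List.pyRange 0 5 1) then valid_movements + 1
      else valid_movements)
    0

-- ===== PORT B =====
def check_free_columns_to_win_alt (board : List (List Int)) (rival_number : Int) : Int :=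
  let blocked : PySem.Set Int :=
    (PySem.List.pyRange 0 5 1).foldl
      (fun s j =>
        (PySem.List.pyRange 0 5 1).foldl
          (fun s i =>
            if PySem.List.pyGetD (PySem.List.pyGetD board j []) i 0 == rival_number then
              PySem.Set.add s i
            else s)
          s)
      PySem.Set.empty
  5 - (PySem.Set.len blocked : Int)

-- ===== PRECONDITION & SPEC =====
-- Pre_ excludes boards without a full 5x5 prefix, on which both Pythons normally raise IndexError;
-- it also excludes the ragged boards where A's early break happens to skip every missing cell and
-- A still returns (see cites), since B reads all 25 cells and raises there.
def Pre_check_free_columns_to_win (board : List (List Int)) (rival_number : Int) : Prop :=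
  5 ≤ board.length ∧ ∀ row ∈ board.take 5, 5 ≤ row.length
instance (board : List (List Int)) (rival_number : Int) : Decidable (Pre_check_free_columns_to_win board rival_number) := by unfold Pre_check_free_columns_to_win; infer_instance

def pvWitness_check_free_columns_to_win : List (List Int) × Int :=
  ([[0,0,0,0,0],[0,1,0,0,0],[0,0,0,0,0],[0,0,0,2,0],[0,0,0,0,0]], 1)

def Spec_check_free_columns_to_win (board : List (List Int)) (rival_number : Int) (out : Int) : Prop := out = check_free_columns_to_win_alt board rival_number
instance (board : List (List Int)) (rival_number : Int) (out : Int) : Decidable (Spec_check_free_columns_to_win board rival_number out) := by unfold Spec_check_free_columns_to_win; infer_instance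

-- ===== CLAIM (what is proved, stated in full; the proofs are below) =====
def Claim_equal_check_free_columns_to_win : Prop := ∀ (board : List (List Int)) (rival_number : Int), Dom_check_free_columns_to_win board rival_number → Pre_check_free_columns_to_win board rival_number → Spec_check_free_columns_to_win board rival_number (check_free_columns_to_win board rival_number)

-- ===== LEMMAS AND PROOFS =====

-- the cell test both ports perform, and "column i contains a rival piece in rows 0..4"
def pvCell (board : List (List Int)) (rival_number j i : Int) : Bool :=
  PySem.List.pyGetD (PySem.List.pyGetD board j []) i 0 == rival_number

def pvBlockedCol (board : List (List Int)) (rival_number i : Int) : Bool :=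
  pvCell board rival_number 0 i || pvCell board rival_number 1 i || pvCell board rival_number 2 i ||
  pvCell board rival_number 3 i || pvCell board rival_number 4 i

lemma pvRange5 : PySem.List.pyRange 0 5 1 = ([0, 1, 2, 3, 4] : List Int) := by decide

lemma pvAInner_eq (board : List (List Int)) (rival_number i : Int) :
    pvAInner board rival_number i ([0, 1, 2, 3, 4] : List Int) =
      !pvBlockedCol board rival_number i := by
  simp only [pvAInner, pvBlockedCol, pvCell]
  by_cases h0 : PySem.List.pyGetD (PySem.List.pyGetD board 0 []) i 0 == rival_number <;>
  by_cases h1 : PySem.List.pyGetD (PySem.List.pyGetD board 1 []) i 0 == rival_number <;>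
  by_cases h2 : PySem.List.pyGetD (PySem.List.pyGetD board 2 []) i 0 == rival_number <;>
  by_cases h3 : PySem.List.pyGetD (PySem.List.pyGetD board 3 []) i 0 == rival_number <;>
  by_cases h4 : PySem.List.pyGetD (PySem.List.pyGetD board 4 []) i 0 == rival_number <;>
  simp [h0, h1, h2, h3, h4]

lemma pvA_count (board : List (List Int)) (rival_number : Int) :
    check_free_columns_to_win board rival_number =
      ((([0, 1, 2, 3, 4] : List Int).filter
          (fun i => !pvBlockedCol board rival_number i)).length : Int) := by
  simp only [check_free_columns_to_win, pvRange5, pvAInner_eq, List.foldl, List.filter]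
  by_cases h0 : pvBlockedCol board rival_number 0 <;>
  by_cases h1 : pvBlockedCol board rival_number 1 <;>
  by_cases h2 : pvBlockedCol board rival_number 2 <;>
  by_cases h3 : pvBlockedCol board rival_number 3 <;>
  by_cases h4 : pvBlockedCol board rival_number 4 <;>
  simp [h0, h1, h2, h3, h4]

-- B's blocked set is set(L0 + L1 + L2 + L3 + L4) where Lj lists the columns blocked in row j
lemma pvB_blocked (board : List (List Int)) (rival_number : Int) :
    (PySem.List.pyRange 0 5 1).foldl
      (fun s j =>
        (PySem.List.pyRange 0 5 1).foldl
          (fun s i =>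
            if PySem.List.pyGetD (PySem.List.pyGetD board j []) i 0 == rival_number then
              PySem.Set.add s i
            else s)
          s)
      PySem.Set.empty =
    PySem.Set.ofList
      ((([0, 1, 2, 3, 4] : List Int).filter (fun i => pvCell board rival_number 0 i)) ++
       (([0, 1, 2, 3, 4] : List Int).filter (fun i => pvCell board rival_number 1 i)) ++
       (([0, 1, 2, 3, 4] : List Int).filter (fun i => pvCell board rival_number 2 i)) ++
       (([0, 1, 2, 3, 4] : List Int).filter (fun i => pvCell board rival_number 3 i)) ++
       (([0, 1, 2, 3, 4] : List Int).filter (fun i => pvCell board rival_number 4 i))) := by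
  have hinner : ∀ (j : Int) (s : PySem.Set Int),
      (([0, 1, 2, 3, 4] : List Int)).foldl
        (fun s i =>
          if PySem.List.pyGetD (PySem.List.pyGetD board j []) i 0 == rival_number then
            PySem.Set.add s i
          else s)
        s =
      PySem.Set.update s
        (([0, 1, 2, 3, 4] : List Int).filter (fun i => pvCell board rival_number j i)) := by
    intro j s
    rw [PySem.Set.update, List.foldl_filter]
    rfl
  simp only [pvRange5, List.foldl, hinner]
  rw [show (PySem.Set.empty : PySem.Set Int) = PySem.Set.ofList [] from rfl]
  rw [← PySem.Set.ofList_append, ← PySem.Set.ofList_append, ← PySem.Set.ofList_append,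
      ← PySem.Set.ofList_append]
  rw [← PySem.Set.ofList_append]
  simp [List.append_assoc]

lemma pvB_count (board : List (List Int)) (rival_number : Int) :
    check_free_columns_to_win_alt board rival_number =
      5 - ((([0, 1, 2, 3, 4] : List Int).filter
          (fun i => pvBlockedCol board rival_number i)).length : Int) := by
  simp only [check_free_columns_to_win_alt, pvB_blocked]
  have hperm :
      (PySem.Set.ofList
        ((([0, 1, 2, 3, 4] : List Int).filter (fun i => pvCell board rival_number 0 i)) ++
         (([0, 1, 2, 3, 4] : List Int).filter (fun i => pvCell board rival_number 1 i)) ++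
         (([0, 1, 2, 3, 4] : List Int).filter (fun i => pvCell board rival_number 2 i)) ++
         (([0, 1, 2, 3, 4] : List Int).filter (fun i => pvCell board rival_number 3 i)) ++
         (([0, 1, 2, 3, 4] : List Int).filter (fun i => pvCell board rival_number 4 i)))).Perm
      (([0, 1, 2, 3, 4] : List Int).filter (fun i => pvBlockedCol board rival_number i)) := by
    refine (List.perm_ext_iff_of_nodup (PySem.Set.nodup_ofList _)
      (List.Nodup.filter _ (by decide))).mpr ?_
    intro x
    simp only [PySem.Set.mem_ofList, List.mem_append, List.mem_filter, pvBlockedCol]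
    constructor
    · rintro (((((⟨hm, h⟩ | ⟨hm, h⟩) | ⟨hm, h⟩) | ⟨hm, h⟩) | ⟨hm, h⟩)) <;>
        exact ⟨hm, by simp [h]⟩
    · rintro ⟨hm, h⟩
      simp only [Bool.or_eq_true] at h
      rcases h with ((((h | h) | h) | h) | h)
      · exact Or.inl (Or.inl (Or.inl (Or.inl ⟨hm, h⟩)))
      · exact Or.inl (Or.inl (Or.inl (Or.inr ⟨hm, h⟩)))
      · exact Or.inl (Or.inl (Or.inr ⟨hm, h⟩))
      · exact Or.inl (Or.inr ⟨hm, h⟩)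
      · exact Or.inr ⟨hm, h⟩
  have hlen := hperm.length_eq
  simp only [PySem.Set.len, hlen]

lemma pvFilter_partition (board : List (List Int)) (rival_number : Int) :
    ((([0, 1, 2, 3, 4] : List Int).filter
        (fun i => !pvBlockedCol board rival_number i)).length)
      + ((([0, 1, 2, 3, 4] : List Int).filter
        (fun i => pvBlockedCol board rival_number i)).length) = 5 := by
  by_cases h0 : pvBlockedCol board rival_number 0 <;>
  by_cases h1 : pvBlockedCol board rival_number 1 <;>
  by_cases h2 : pvBlockedCol board rival_number 2 <;>
  by_cases h3 : pvBlockedCol board rival_number 3 <;>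
  by_cases h4 : pvBlockedCol board rival_number 4 <;>
  simp [List.filter, h0, h1, h2, h3, h4]

-- ===== VERDICT (by name: the statement is the Claim_ definition above) =====
theorem check_free_columns_to_win_spec : Claim_equal_check_free_columns_to_win := by
  intro board rival_number _ _
  unfold Spec_check_free_columns_to_win
  rw [pvA_count, pvB_count]
  have h := pvFilter_partition board rival_number
  omega
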